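-- pv_equiv track=rewrite | github.com/giaxyz/ChiSquaredContingencies | StatsHandler.py | discretizeColumn
-- ===== SOURCE A (Python) =====
-- def discretizeColumn(attributeName, listOfValues, partitions, discreetLabels):
--
--
--     """
--     Perform discretiztion on a given column of data.
--     Input:
--         attributeName : the name of the attribute to add to the top of the column
--         listOfValues : the discretization margins
--         partitions : the number of partitions
--         discreetLabels : the labels used to discretize within the listOfValues ie. partition values
--
--     Return : the discretized column as a list, with the variable attribute name on the top
--
--     """
--
--     column = [attributeName]
--
--
--     for i in range(0, len(listOfValues)):
--
--         column.append(discreetLabels[0])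
--
--     for i in range(0, (len(partitions))-1):
--
--
--         discreetLabelsIndex = i + 1
--         nextLabel = discreetLabels[discreetLabelsIndex]
--         nextPartition = partitions[i]
--
--
--         for j in range(0, len(listOfValues)):
--
--             currentValue = listOfValues[j]
--
--             if(currentValue > nextPartition):
--
--
--                 column[j + 1] = nextLabel
--
--     return column
-- ===== SOURCE B (Python) =====
-- def discretizeColumn(attributeName, listOfValues, partitions, discreetLabels):
--     def label(v):
--         # last threshold (in partition order) that v exceeds wins, so scan from the top
--         for i in range(len(partitions) - 2, -1, -1):
--             if v > partitions[i]:
--                 return discreetLabels[i + 1]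
--         return discreetLabels[0]
--     return [attributeName] + [label(v) for v in listOfValues]
-- ===== Notes on version B (the rewrite author's own statement) =====
-- stated objective: simpler
-- what changed: Replaces A's partition-major nested loops that repeatedly overwrite a mutable column with a single pure map over the values, each value's label decided by one top-down scan of the thresholds that stops at the first threshold exceeded (avoiding m passes and the repeated list writes).
import Mathlib
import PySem

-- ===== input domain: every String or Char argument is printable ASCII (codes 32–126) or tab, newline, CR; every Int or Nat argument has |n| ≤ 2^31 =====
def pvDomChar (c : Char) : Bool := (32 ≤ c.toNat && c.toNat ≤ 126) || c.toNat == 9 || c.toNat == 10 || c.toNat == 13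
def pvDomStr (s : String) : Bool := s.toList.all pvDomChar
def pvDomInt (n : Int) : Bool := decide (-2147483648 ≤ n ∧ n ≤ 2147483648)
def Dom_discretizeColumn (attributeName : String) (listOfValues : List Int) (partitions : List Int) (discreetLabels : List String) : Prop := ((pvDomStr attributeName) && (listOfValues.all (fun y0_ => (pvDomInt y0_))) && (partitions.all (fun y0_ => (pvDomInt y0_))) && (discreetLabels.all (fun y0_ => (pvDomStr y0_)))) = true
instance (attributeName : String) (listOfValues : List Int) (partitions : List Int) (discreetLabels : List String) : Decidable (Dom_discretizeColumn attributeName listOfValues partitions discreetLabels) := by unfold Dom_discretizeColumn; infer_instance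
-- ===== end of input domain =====

-- B replaces A's partition-major overwrite loops by a pure per-value top-down threshold scan (objective: simpler).

-- ===== PORT A =====
-- literal transliteration of A: build column of first labels, then for each
-- partition index i overwrite every position whose value exceeds partitions[i].
def discretizeColumn (attributeName : String) (listOfValues : List Int) (partitions : List Int) (discreetLabels : List String) : List String :=
  let column : List String :=
    attributeName :: listOfValues.map (fun _ => (discreetLabels[0]?).getD "")
  (List.range (partitions.length - 1)).foldl
    (fun col i =>
      let nextLabel := (discreetLabels[i + 1]?).getD ""
      let nextPartition := (partitions[i]?).getD 0
      (List.range listOfValues.length).foldl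
        (fun col j =>
          if ((listOfValues[j]?).getD 0) > nextPartition then col.set (j + 1) nextLabel
          else col)
        col)
    column

-- ===== PORT B =====
-- B's helper: scan the (index, threshold) pairs from the top; first one that v
-- exceeds decides the label, otherwise the first label.
def pvLabelOf (v : Int) (pairs : List (Nat × Int)) (discreetLabels : List String) : String :=
  match pairs with
  | [] => (discreetLabels[0]?).getD ""
  | (i, p) :: rest =>
    if v > p then (discreetLabels[i + 1]?).getD "" else pvLabelOf v rest discreetLabels

def discretizeColumn_alt (attributeName : String) (listOfValues : List Int) (partitions : List Int) (discreetLabels : List String) : List String :=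
  let pairs : List (Nat × Int) :=
    ((List.range (partitions.length - 1)).map (fun i => (i, (partitions[i]?).getD 0))).reverse
  attributeName :: listOfValues.map (fun v => pvLabelOf v pairs discreetLabels)

-- ===== PRECONDITION & SPEC =====
-- Pre_ excludes exactly the inputs where Python A raises IndexError: it reads
-- discreetLabels[i+1] for every i < len(partitions)-1 and discreetLabels[0]
-- whenever listOfValues is nonempty.
def Pre_discretizeColumn (attributeName : String) (listOfValues : List Int) (partitions : List Int) (discreetLabels : List String) : Prop :=
  (2 ≤ partitions.length → partitions.length ≤ discreetLabels.length) ∧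
  (listOfValues ≠ [] → discreetLabels ≠ [])
instance (attributeName : String) (listOfValues : List Int) (partitions : List Int) (discreetLabels : List String) : Decidable (Pre_discretizeColumn attributeName listOfValues partitions discreetLabels) := by unfold Pre_discretizeColumn; infer_instance

def pvWitness_discretizeColumn : String × List Int × List Int × List String :=
  ("x", [1, 5], [3, 9], ["lo", "mid", "hi"])

def Spec_discretizeColumn (attributeName : String) (listOfValues : List Int) (partitions : List Int) (discreetLabels : List String) (out : List String) : Prop := out = discretizeColumn_alt attributeName listOfValues partitions discreetLabels
instance (attributeName : String) (listOfValues : List Int) (partitions : List Int) (discreetLabels : List String) (out : List String) : Decidable (Spec_discretizeColumn attributeName listOfValues partitions discreetLabels out) := by unfold Spec_discretizeColumn; infer_instance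

-- ===== CLAIM (what is proved, stated in full; the proofs are below) =====
def Claim_equal_discretizeColumn : Prop := ∀ (attributeName : String) (listOfValues : List Int) (partitions : List Int) (discreetLabels : List String), Dom_discretizeColumn attributeName listOfValues partitions discreetLabels → Pre_discretizeColumn attributeName listOfValues partitions discreetLabels → Spec_discretizeColumn attributeName listOfValues partitions discreetLabels (discretizeColumn attributeName listOfValues partitions discreetLabels)

-- ===== LEMMAS AND PROOFS =====

-- the label A's loops assign after processing partition indices 0..k-1
def pvGA (partitions : List Int) (discreetLabels : List String) : Nat → Int → String
  | 0, _ => (discreetLabels[0]?).getD ""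
  | k + 1, v =>
    if v > (partitions[k]?).getD 0 then (discreetLabels[k + 1]?).getD ""
    else pvGA partitions discreetLabels k v

-- one inner pass of A rewrites each labelled cell pointwise
theorem pv_inner (p : Int) (lbl : String) :
    ∀ (lv : List Int) (l tail : List String) (a : String), l.length = lv.length →
    (List.range lv.length).foldl
      (fun col j => if ((lv[j]?).getD 0) > p then col.set (j + 1) lbl else col)
      (a :: (l ++ tail))
    = a :: (List.zipWith (fun v s => if v > p then lbl else s) lv l ++ tail) := by
  intro lv
  induction lv using List.reverseRecOn with
  | nil => intro l tail a h; simp at h; simp [h]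
  | append_singleton lv' v ih =>
    intro l tail a h
    rcases l.eq_nil_or_concat with rfl | ⟨l', s, rfl⟩
    · simp at h
    · simp only [List.concat_eq_append] at h ⊢
      have hl : l'.length = lv'.length := by simpa using h
      simp only [List.length_append, List.length_singleton, List.range_succ, List.foldl_append]
      have hcong :
          List.foldl (fun col j => if (((lv' ++ [v])[j]?).getD 0) > p then col.set (j + 1) lbl else col)
            (a :: (l' ++ [s] ++ tail)) (List.range lv'.length)
          = List.foldl (fun col j => if ((lv'[j]?).getD 0) > p then col.set (j + 1) lbl else col)
            (a :: (l' ++ [s] ++ tail)) (List.range lv'.length) :=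
        PySem.List.foldl_congr_mem _ _ _ _ (by
          intro acc x hx
          have hxlt : x < lv'.length := List.mem_range.mp hx
          rw [List.getElem?_append_left hxlt])
      rw [hcong]
      rw [List.append_assoc, List.singleton_append, ih l' (s :: tail) a hl]
      simp only [List.foldl_cons, List.foldl_nil]
      have hgz : ((lv' ++ [v])[lv'.length]?).getD 0 = v := by
        simp
      rw [hgz]
      have hzlen : (List.zipWith (fun v s => if v > p then lbl else s) lv' l').length = lv'.length := by
        simp [hl]
      by_cases hv : v > p
      · simp only [hv, if_pos]
        rw [List.zipWith_append hl.symm]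
        have : (a :: (List.zipWith (fun v s => if v > p then lbl else s) lv' l' ++ s :: tail)).set (lv'.length + 1) lbl
            = a :: ((List.zipWith (fun v s => if v > p then lbl else s) lv' l' ++ s :: tail).set lv'.length lbl) := by
          simp [List.set_cons_succ]
        rw [this, List.set_append_right _ _ (by omega)]
        simp [hzlen, hv]
      · simp only [hv, if_false]
        rw [List.zipWith_append hl.symm]
        simp [hv]

theorem pv_zip_map (p : Int) (lbl : String) (g : Int → String) (lv : List Int) :
    List.zipWith (fun v s => if v > p then lbl else s) lv (lv.map g)
    = lv.map (fun v => if v > p then lbl else g v) := by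
  induction lv with
  | nil => rfl
  | cons x xs ih => simp [ih]

-- A's outer loop computes pvGA pointwise
theorem pv_outer (partitions : List Int) (discreetLabels : List String)
    (lv : List Int) (a : String) :
    ∀ (m : Nat),
    (List.range m).foldl
      (fun col i =>
        (List.range lv.length).foldl
          (fun col j =>
            if ((lv[j]?).getD 0) > (partitions[i]?).getD 0 then
              col.set (j + 1) ((discreetLabels[i + 1]?).getD "")
            else col)
          col)
      (a :: lv.map (pvGA partitions discreetLabels 0))
    = a :: lv.map (pvGA partitions discreetLabels m) := by
  intro m
  induction m with
  | zero => simp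
  | succ k ih =>
    rw [List.range_succ, List.foldl_append, ih]
    simp only [List.foldl_cons, List.foldl_nil]
    have := pv_inner ((partitions[k]?).getD 0) ((discreetLabels[k + 1]?).getD "")
      lv (lv.map (pvGA partitions discreetLabels k)) [] a (by simp)
    simp only [List.append_nil] at this
    rw [this, pv_zip_map]
    rfl

-- B's top-down scan over the reversed enumerated prefix equals pvGA
theorem pv_label_eq (partitions : List Int) (discreetLabels : List String) (v : Int) :
    ∀ (m : Nat),
    pvLabelOf v (((List.range m).map (fun i => (i, (partitions[i]?).getD 0))).reverse) discreetLabels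
    = pvGA partitions discreetLabels m v := by
  intro m
  induction m with
  | zero => rfl
  | succ k ih =>
    rw [List.range_succ]
    simp only [List.map_append, List.reverse_append, List.map_cons, List.map_nil,
      List.reverse_cons, List.reverse_nil, List.nil_append, List.cons_append]
    simp only [pvLabelOf, pvGA]
    rw [ih]

-- ===== VERDICT (by name: the statement is the Claim_ definition above) =====
theorem discretizeColumn_spec : Claim_equal_discretizeColumn := by
  intro attributeName listOfValues partitions discreetLabels _ _
  unfold Spec_discretizeColumn discretizeColumn discretizeColumn_alt
  have hbase : listOfValues.map (fun _ => (discreetLabels[0]?).getD "")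
      = listOfValues.map (pvGA partitions discreetLabels 0) := by
    simp [pvGA]
  rw [hbase, pv_outer partitions discreetLabels listOfValues attributeName (partitions.length - 1)]
  congr 1
  exact List.map_congr_left (fun v _ => (pv_label_eq partitions discreetLabels v (partitions.length - 1)).symm)
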